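-- pv_equiv track=rewrite | github.com/yyytae0/algorithm-training | programmers/2-32.py | solution
-- ===== SOURCE A (Python) =====
-- def solution(n):
--     dp = [[0 for _ in range(2)] for _ in range(n+1)]
--     dp[0] = [1, 0]
--     dp[1] = [1, 0]
--     for i in range(2, n+1):
--         dp[i][0] = sum(dp[i-1]) % 1234567
--         dp[i][1] = sum(dp[i-2]) % 1234567
--     answer = sum(dp[n]) % 1234567
--     return answer
-- ===== SOURCE B (Python) =====
-- def solution(n):
--     MOD = 1234567
--     # fast-doubling Fibonacci: fd(k) = (F(k) % MOD, F(k+1) % MOD), F(0)=0, F(1)=1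
--     def fd(k):
--         if k == 0:
--             return (0, 1)
--         a, b = fd(k // 2)
--         c = a * (2 * b - a) % MOD
--         d = (a * a + b * b) % MOD
--         if k % 2:
--             return (d, (c + d) % MOD)
--         return (c, d)
--     return fd(n + 1)[0]
-- ===== Notes on version B (the rewrite author's own statement) =====
-- stated objective: faster
-- what changed: Replaces A's O(n) DP table of row pairs summed mod 1234567 by a fast-doubling Fibonacci recursion that computes F(n+1) mod 1234567 in O(log n) steps.
import Mathlib
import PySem

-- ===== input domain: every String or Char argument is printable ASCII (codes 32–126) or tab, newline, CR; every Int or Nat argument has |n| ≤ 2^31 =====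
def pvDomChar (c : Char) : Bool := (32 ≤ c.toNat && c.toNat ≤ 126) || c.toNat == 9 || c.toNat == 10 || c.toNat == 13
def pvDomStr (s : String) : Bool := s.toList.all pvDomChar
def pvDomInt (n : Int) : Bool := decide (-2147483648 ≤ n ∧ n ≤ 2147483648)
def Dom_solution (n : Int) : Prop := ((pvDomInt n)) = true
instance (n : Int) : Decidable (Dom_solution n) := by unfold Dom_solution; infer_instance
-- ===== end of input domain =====

-- B replaces A's O(n) DP table by fast-doubling Fibonacci mod 1234567 (O(log n)); equal on n ≥ 1.

-- ===== PORT A =====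
-- loop body of 'for i in range(2, n+1)': dp[i][0] = sum(dp[i-1]) % 1234567; dp[i][1] = sum(dp[i-2]) % 1234567
-- (the two element assignments write the two components of dp[i], read from untouched rows i-1, i-2)
def stepA (dp : List (Int × Int)) (i : Int) : List (Int × Int) :=
  let p1 := PySem.List.pyGetD dp (i - 1) (0, 0)
  let p2 := PySem.List.pyGetD dp (i - 2) (0, 0)
  PySem.List.pySetD dp i
    (PySem.Int.mod (p1.1 + p1.2) 1234567, PySem.Int.mod (p2.1 + p2.2) 1234567)

def solution (n : Int) : Int :=
  -- dp = [[0,0] for _ in range(n+1)]; dp[0] = [1,0]; dp[1] = [1,0]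
  -- (Python raises IndexError on the dp[0]/dp[1] writes when n < 1; Pre_ excludes those inputs)
  let dp0 : List (Int × Int) := (PySem.List.pyRange 0 (n + 1) 1).map (fun _ => (0, 0))
  let dp1 := PySem.List.pySetD dp0 0 (1, 0)
  let dp2 := PySem.List.pySetD dp1 1 (1, 0)
  let dp := (PySem.List.pyRange 2 (n + 1) 1).foldl stepA dp2
  let pn := PySem.List.pyGetD dp n (0, 0)
  PySem.Int.mod (pn.1 + pn.2) 1234567

-- ===== PORT B =====
-- fd(k) = (F(k) % 1234567, F(k+1) % 1234567) by fast doubling; fuel makes the k -> k//2 recursion structural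
def fdAlt : Nat → Nat → Int × Int
  | _, 0 => (0, 1)
  | 0, _ + 1 => (0, 1)      -- fuel exhausted: unreachable when fuel ≥ k
  | fuel + 1, k + 1 =>
    let p := fdAlt fuel ((k + 1) / 2)
    let a := p.1
    let b := p.2
    let c := PySem.Int.mod (a * (2 * b - a)) 1234567
    let d := PySem.Int.mod (a * a + b * b) 1234567
    if (k + 1) % 2 = 1 then (d, PySem.Int.mod (c + d) 1234567) else (c, d)

def solution_alt (n : Int) : Int := (fdAlt (n + 1).toNat (n + 1).toNat).1

-- ===== PRECONDITION & SPEC =====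
-- Python A raises IndexError for every n ≤ 0 (the dp[0]/dp[1] writes); those inputs are excluded.
def Pre_solution (n : Int) : Prop := 1 ≤ n
instance (n : Int) : Decidable (Pre_solution n) := by unfold Pre_solution; infer_instance

def pvWitness_solution : Int := 5

def Spec_solution (n : Int) (out : Int) : Prop := out = solution_alt n
instance (n : Int) (out : Int) : Decidable (Spec_solution n out) := by unfold Spec_solution; infer_instance

-- ===== CLAIM (what is proved, stated in full; the proofs are below) =====
def Claim_equal_solution : Prop := ∀ (n : Int), Dom_solution n → Pre_solution n → Spec_solution n (solution n)

-- ===== LEMMAS AND PROOFS =====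

-- B side: fdAlt computes Fibonacci pairs mod 1234567 whenever it has enough fuel
theorem fdAlt_eq (fuel k : Nat) (h : k ≤ fuel) :
    fdAlt fuel k = ((Nat.fib k : Int) % 1234567, (Nat.fib (k + 1) : Int) % 1234567) := by
  induction fuel generalizing k with
  | zero =>
    interval_cases k
    simp [fdAlt]
  | succ f ih =>
    match k with
    | 0 => simp [fdAlt]
    | k + 1 =>
      have hm : (k + 1) / 2 ≤ f := by omega
      rw [fdAlt, ih _ hm]
      set m := (k + 1) / 2 with hmdef
      have hfib : Nat.fib m ≤ 2 * Nat.fib (m + 1) := by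
        have := Nat.fib_le_fib_succ (n := m); omega
      have hc : ((Nat.fib m : Int) % 1234567 * (2 * ((Nat.fib (m + 1) : Int) % 1234567) - (Nat.fib m : Int) % 1234567)) % 1234567
          = (Nat.fib (2 * m) : Int) % 1234567 := by
        have hx : ((Nat.fib m : Int) % 1234567) ≡ (Nat.fib m : Int) [ZMOD 1234567] :=
          Int.emod_emod_of_dvd _ dvd_rfl
        have hy : ((Nat.fib (m + 1) : Int) % 1234567) ≡ (Nat.fib (m + 1) : Int) [ZMOD 1234567] :=
          Int.emod_emod_of_dvd _ dvd_rfl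
        have := hx.mul ((hy.mul_left 2).sub hx)
        calc ((Nat.fib m : Int) % 1234567 * (2 * ((Nat.fib (m + 1) : Int) % 1234567) - (Nat.fib m : Int) % 1234567)) % 1234567
            = ((Nat.fib m : Int) * (2 * (Nat.fib (m + 1) : Int) - (Nat.fib m : Int))) % 1234567 := this
          _ = (Nat.fib (2 * m) : Int) % 1234567 := by rw [Nat.fib_two_mul]; push_cast [hfib]; ring_nf
      have hd : ((Nat.fib m : Int) % 1234567 * ((Nat.fib m : Int) % 1234567) + (Nat.fib (m + 1) : Int) % 1234567 * ((Nat.fib (m + 1) : Int) % 1234567)) % 1234567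
          = (Nat.fib (2 * m + 1) : Int) % 1234567 := by
        have hx : ((Nat.fib m : Int) % 1234567) ≡ (Nat.fib m : Int) [ZMOD 1234567] :=
          Int.emod_emod_of_dvd _ dvd_rfl
        have hy : ((Nat.fib (m + 1) : Int) % 1234567) ≡ (Nat.fib (m + 1) : Int) [ZMOD 1234567] :=
          Int.emod_emod_of_dvd _ dvd_rfl
        have := (hx.mul hx).add (hy.mul hy)
        calc ((Nat.fib m : Int) % 1234567 * ((Nat.fib m : Int) % 1234567) + (Nat.fib (m + 1) : Int) % 1234567 * ((Nat.fib (m + 1) : Int) % 1234567)) % 1234567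
            = ((Nat.fib m : Int) * (Nat.fib m : Int) + (Nat.fib (m + 1) : Int) * (Nat.fib (m + 1) : Int)) % 1234567 := this
          _ = (Nat.fib (2 * m + 1) : Int) % 1234567 := by rw [Nat.fib_two_mul_add_one]; push_cast; ring_nf
      rcases Nat.even_or_odd (k + 1) with he | ho
      · obtain ⟨t, ht⟩ := he
        have h2m : k + 1 = 2 * m := by omega
        have : (k + 1) % 2 = 0 := by omega
        simp only [PySem.Int.mod_eq_emod_of_pos (by norm_num : (0:Int) < 1234567), this]
        simp only [h2m]
        exact Prod.ext (by simpa using hc) (by simpa using hd)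
      · obtain ⟨t, ht⟩ := ho
        have h2m : k + 1 = 2 * m + 1 := by omega
        have hpar : (k + 1) % 2 = 1 := by omega
        simp only [PySem.Int.mod_eq_emod_of_pos (by norm_num : (0:Int) < 1234567), hpar]
        simp only [h2m]
        refine Prod.ext (by simpa using hd) ?_
        have hsum : ((Nat.fib (2 * m) : Int) % 1234567 + (Nat.fib (2 * m + 1) : Int) % 1234567) % 1234567
            = (Nat.fib (2 * m + 1 + 1) : Int) % 1234567 := by
          have hf : Nat.fib (2 * m + 1 + 1) = Nat.fib (2 * m) + Nat.fib (2 * m + 1) := by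
            rw [show 2 * m + 1 + 1 = 2 * m + 2 from rfl, Nat.fib_add_two]
          rw [← Int.add_emod, hf]; push_cast; ring_nf
        simpa [hc, hd] using hsum

-- A side: the dp rows
def G : Nat → Int × Int
  | 0 => (1, 0)
  | 1 => (1, 0)
  | (j + 2) => ((Nat.fib (j + 2) : Int) % 1234567, (Nat.fib (j + 1) : Int) % 1234567)

-- the dp list after the loop has processed i = 2 .. m (rows > m still the initial value)
def st (N m : Nat) : List (Int × Int) :=
  (List.range (N + 1)).map (fun j => if j ≤ m then G j else (0, 0))

theorem sumG (j : Nat) :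
    PySem.Int.mod ((G j).1 + (G j).2) 1234567 = (Nat.fib (j + 1) : Int) % 1234567 := by
  rw [PySem.Int.mod_eq_emod_of_pos (by norm_num : (0:Int) < 1234567)]
  match j with
  | 0 => norm_num [G]
  | 1 => norm_num [G]
  | (j + 2) =>
    show ((Nat.fib (j + 2) : Int) % 1234567 + (Nat.fib (j + 1) : Int) % 1234567) % 1234567 = _
    have hf : Nat.fib (j + 2 + 1) = Nat.fib (j + 1) + Nat.fib (j + 2) := by
      rw [show j + 2 + 1 = j + 1 + 2 from rfl, Nat.fib_add_two]
    rw [← Int.add_emod, hf]; push_cast; ring_nf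

theorem st_len (N m : Nat) : (st N m).length = N + 1 := by simp [st]

theorem st_getD (N m j : Nat) (hj : j ≤ N) :
    (st N m).getD j (0, 0) = if j ≤ m then G j else (0, 0) := by
  rw [st, List.getD_eq_getElem?_getD]
  rw [List.getElem?_eq_getElem (by simp; omega)]
  simp

theorem init_eq (n : Int) (hn : 1 ≤ n) :
    PySem.List.pySetD (PySem.List.pySetD
        ((PySem.List.pyRange 0 (n + 1) 1).map (fun _ => ((0:Int), (0:Int)))) 0 (1, 0)) 1 (1, 0)
      = st n.toNat 1 := by
  rw [PySem.List.pySetD_of_nonneg _ _ (by norm_num), PySem.List.pySetD_of_nonneg _ _ (by norm_num)]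
  apply List.ext_getElem
  · simp [st, PySem.List.pyRange_one]; omega
  · intro i h1 h2
    simp only [List.getElem_set, PySem.List.pyRange_one, List.getElem_map, List.getElem_range, st]
    have hi : i < n.toNat + 1 := by simpa [st] using h2
    rcases Nat.lt_or_ge i 2 with h | h
    · interval_cases i <;> simp [G]
    · have : ¬ i ≤ 1 := by omega
      simp only [Int.toNat_zero, Int.toNat_one]
      rw [if_neg (by omega), if_neg (by omega), if_neg this]

theorem step_st (N m : Nat) (h1 : 1 ≤ m) (h2 : m + 1 ≤ N) :
    stepA (st N m) ((m : Int) + 1) = st N (m + 1) := by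
  have hidx1 : ((m : Int) + 1 - 1) = ((m : Nat) : Int) := by omega
  have hidx2 : ((m : Int) + 1 - 2) = (((m - 1 : Nat) : Nat) : Int) := by omega
  have hidx0 : ((m : Int) + 1) = (((m + 1 : Nat)) : Int) := by omega
  rw [stepA, hidx1, hidx2, hidx0]
  rw [PySem.List.pyGetD_natCast, PySem.List.pyGetD_natCast, PySem.List.pySetD_natCast]
  rw [st_getD N m m (by omega), st_getD N m (m - 1) (by omega)]
  rw [if_pos (le_refl m), if_pos (by omega)]
  have hG : (PySem.Int.mod ((G m).1 + (G m).2) 1234567,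
             PySem.Int.mod ((G (m - 1)).1 + (G (m - 1)).2) 1234567) = G (m + 1) := by
    have e1 := sumG m
    have e2 := sumG (m - 1)
    have hm1 : m - 1 + 1 = m := by omega
    rw [hm1] at e2
    match m, h1 with
    | (j + 1), _ =>
      show _ = G (j + 1 + 1)
      rw [show j + 1 + 1 = j + 2 from rfl]
      exact Prod.ext (by simpa using e1) (by simpa using e2)
  rw [hG]
  apply List.ext_getElem
  · simp [st]
  · intro i hx hy
    have hi : i < N + 1 := by simpa [st] using hy
    simp only [List.getElem_set, st, List.getElem_map, List.getElem_range]
    rcases eq_or_ne i (m + 1) with he | he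
    · simp [he]
    · rw [if_neg (by omega)]
      by_cases hle : i ≤ m
      · rw [if_pos hle, if_pos (by omega)]
      · rw [if_neg hle, if_neg (by omega)]

theorem loop_eq (N m : Nat) (h1 : 1 ≤ m) (h2 : m ≤ N) :
    (PySem.List.pyRange 2 ((m : Int) + 1) 1).foldl stepA (st N 1) = st N m := by
  induction m with
  | zero => omega
  | succ p ih =>
    rcases eq_or_ne p 0 with hp | hp
    · subst hp
      rw [PySem.List.pyRange_one_eq_nil (by norm_num)]
      rfl
    · have hp1 : 1 ≤ p := by omega
      have : ((p + 1 : Nat) : Int) + 1 = ((p : Int) + 1) + 1 := by omega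
      rw [this, PySem.List.pyRange_one_succ_right (by omega), List.foldl_append]
      rw [ih hp1 (by omega)]
      exact step_st N p hp1 (by omega)

theorem solution_eq_fib (n : Int) (hn : 1 ≤ n) :
    solution n = (Nat.fib (n.toNat + 1) : Int) % 1234567 := by
  have hN : 1 ≤ n.toNat := by omega
  simp only [solution]
  rw [init_eq n hn]
  have hcast : n + 1 = ((n.toNat : Int)) + 1 := by omega
  rw [hcast, loop_eq n.toNat n.toNat hN (le_refl _)]
  have hget : PySem.List.pyGetD (st n.toNat n.toNat) n (0, 0) = G n.toNat := by
    rw [PySem.List.pyGetD_eq_getElem _ _ (by omega) (by rw [st_len]; omega)]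
    simp only [st, List.getElem_map, List.getElem_range]
    rw [if_pos (le_refl _)]
  rw [hget]
  exact sumG n.toNat

theorem solution_alt_eq_fib (n : Int) (hn : 0 ≤ n) :
    solution_alt n = (Nat.fib (n.toNat + 1) : Int) % 1234567 := by
  rw [solution_alt, fdAlt_eq _ _ (le_refl _)]
  have : (n + 1).toNat = n.toNat + 1 := by omega
  rw [this]

-- ===== VERDICT (by name: the statement is the Claim_ definition above) =====
theorem solution_spec : Claim_equal_solution := by
  intro n _ hpre
  unfold Spec_solution
  rw [solution_eq_fib n hpre, solution_alt_eq_fib n (by exact le_trans (by norm_num) hpre)]
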